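-- pv_equiv track=rewrite | github.com/gallifreyCar/roguelike-combat-game | tools/export_web_data.py | iter_array_tables
-- ===== SOURCE A (Python) =====
-- def iter_array_tables(table_body: str):
--     i = 0
--     while i < len(table_body):
--         while i < len(table_body) and table_body[i] not in "{":
--             i += 1
--         if i >= len(table_body):
--             break
--         start = i
--         depth = 0
--         for j in range(start, len(table_body)):
--             if table_body[j] == "{":
--                 depth += 1
--             elif table_body[j] == "}":
--                 depth -= 1
--                 if depth == 0:
--                     yield table_body[start + 1:j]
--                     i = j + 1
--                     break
--         else:
--             raise ValueError("Unclosed array entry")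
-- ===== SOURCE B (Python) =====
-- def iter_array_tables(table_body: str):
--     depth = 0
--     buf = []
--     for ch in table_body:
--         if ch == '{':
--             if depth > 0:
--                 buf.append(ch)
--             else:
--                 buf = []
--             depth += 1
--         elif ch == '}':
--             if depth > 1:
--                 buf.append(ch)
--                 depth -= 1
--             elif depth == 1:
--                 depth = 0
--                 yield ''.join(buf)
--         elif depth > 0:
--             buf.append(ch)
--     if depth > 0:
--         raise ValueError("Unclosed array entry")
-- ===== Notes on version B (the rewrite author's own statement) =====
-- stated objective: simpler
-- what changed: A's outer skip-to-'{' loop plus inner rescanning depth loop (with slice extraction) is collapsed into one single stateful pass maintaining a depth counter and a character buffer.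
-- outside the precondition, e.g. on iter_array_tables('{'): A raises ValueError, B raises ValueError
import Mathlib
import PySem

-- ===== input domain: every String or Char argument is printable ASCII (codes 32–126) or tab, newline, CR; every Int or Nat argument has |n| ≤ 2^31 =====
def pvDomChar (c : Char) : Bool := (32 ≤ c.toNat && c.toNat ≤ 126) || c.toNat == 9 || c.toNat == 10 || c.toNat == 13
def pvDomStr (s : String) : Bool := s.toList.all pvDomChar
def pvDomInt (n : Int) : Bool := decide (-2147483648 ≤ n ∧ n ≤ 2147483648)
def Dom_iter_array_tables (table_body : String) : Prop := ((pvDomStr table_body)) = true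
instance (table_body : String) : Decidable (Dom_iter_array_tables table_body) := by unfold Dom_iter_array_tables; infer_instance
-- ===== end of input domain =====

-- B replaces A's nested skip-loop + inner rescanning loop by one stateful pass (depth + char buffer); objective: simpler.

-- ===== PORT A =====
-- A's inner 'for j' loop, entered just after an opening '{' (depth already 1,
-- so the running test 'depth == 0 after decrement' becomes 'depth - 1 = 0');
-- the accumulator acc holds exactly the characters A's slice
-- table_body[start+1:j] re-reads at the yield. Returns none where A raises
-- ValueError("Unclosed array entry").
def iterA_inner : List Char → Int → List Char → Option (String × List Char)
  | [], _, _ => none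
  | c :: rest, depth, acc =>
    if c = '{' then iterA_inner rest (depth + 1) (acc ++ [c])
    else if c = '}' then
      if depth - 1 = 0 then some (String.ofList acc, rest)
      else iterA_inner rest (depth - 1) (acc ++ [c])
    else iterA_inner rest depth (acc ++ [c])

theorem iterA_inner_length : ∀ (cs : List Char) (d : Int) (acc : List Char)
    (s : String) (rest2 : List Char),
    iterA_inner cs d acc = some (s, rest2) → rest2.length < cs.length := by
  intro cs
  induction cs with
  | nil => intro d acc s rest2 h; simp [iterA_inner] at h
  | cons c rest ih =>
    intro d acc s rest2 h
    simp only [iterA_inner] at h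
    split_ifs at h
    · exact Nat.lt_trans (ih _ _ _ _ h) (by simp)
    · simp at h; simp [h.2]
    · exact Nat.lt_trans (ih _ _ _ _ h) (by simp)
    · exact Nat.lt_trans (ih _ _ _ _ h) (by simp)

-- A's outer while loop: skip to the next '{', then run the inner scan.
def iterA_outer (cs : List Char) : List String :=
  match h2 : cs.dropWhile (· ≠ '{') with
  | [] => []
  | _ :: rest =>
    match h : iterA_inner rest 1 [] with
    | none => []   -- A raises ValueError here (excluded by Pre_)
    | some (s, rest2) => s :: iterA_outer rest2
termination_by cs.length
decreasing_by
  have hd : (cs.dropWhile (· ≠ '{')).length ≤ cs.length := List.length_dropWhile_le _ _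
  rw [h2] at hd
  have := iterA_inner_length rest 1 [] s rest2 h
  simp at hd
  omega

def iter_array_tables (table_body : String) : List String :=
  iterA_outer table_body.toList

-- ===== PORT B =====
-- one step of B's single for-loop; state = (depth, buf, yielded output)
def iterB_step (st : Int × List Char × List String) (ch : Char) : Int × List Char × List String :=
  let (depth, buf, out) := st
  if ch = '{' then (depth + 1, if depth > 0 then buf ++ [ch] else [], out)
  else if ch = '}' then
    if depth > 1 then (depth - 1, buf ++ [ch], out)
    else if depth = 1 then (0, [], out ++ [String.ofList buf])
    else (depth, buf, out)
  else if depth > 0 then (depth, buf ++ [ch], out)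
  else (depth, buf, out)

def iter_array_tables_alt (table_body : String) : List String :=
  (table_body.toList.foldl iterB_step (0, [], [])).2.2
  -- (after the loop, depth > 0 means B raises ValueError — excluded by Pre_)

-- ===== PRECONDITION & SPEC =====
-- running brace depth (a stray '}' at depth 0 is ignored, as both programs do)
def braceDepth (cs : List Char) : Int :=
  cs.foldl (fun d c => if c = '{' then d + 1 else if c = '}' ∧ d > 0 then d - 1 else d) 0

-- Pre_ excludes exactly the inputs with an unmatched '{', on which BOTH A and B raise ValueError.
def Pre_iter_array_tables (table_body : String) : Prop :=
  braceDepth table_body.toList = 0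
instance (table_body : String) : Decidable (Pre_iter_array_tables table_body) := by
  unfold Pre_iter_array_tables; infer_instance

def pvWitness_iter_array_tables : String := "a{x}b{y{z}}"

def Spec_iter_array_tables (table_body : String) (out : List String) : Prop := out = iter_array_tables_alt table_body
instance (table_body : String) (out : List String) : Decidable (Spec_iter_array_tables table_body out) := by unfold Spec_iter_array_tables; infer_instance

-- ===== CLAIM (what is proved, stated in full; the proofs are below) =====
def Claim_equal_iter_array_tables : Prop := ∀ (table_body : String), Dom_iter_array_tables table_body → Pre_iter_array_tables table_body → Spec_iter_array_tables table_body (iter_array_tables table_body)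

-- ===== LEMMAS AND PROOFS =====

-- generalized running depth starting at d
def balD (cs : List Char) (d : Int) : Int :=
  cs.foldl (fun d c => if c = '{' then d + 1 else if c = '}' ∧ d > 0 then d - 1 else d) d

theorem balD_nil (d : Int) : balD [] d = d := rfl

theorem balD_cons (c : Char) (cs : List Char) (d : Int) :
    balD (c :: cs) d = balD cs (if c = '{' then d + 1 else if c = '}' ∧ d > 0 then d - 1 else d) := rfl

-- B's yielded output only grows; it factors through the empty accumulator
theorem iterB_out_append : ∀ (cs : List Char) (d : Int) (buf : List Char) (out : List String),
    cs.foldl iterB_step (d, buf, out) =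
      ((cs.foldl iterB_step (d, buf, [])).1,
       (cs.foldl iterB_step (d, buf, [])).2.1,
       out ++ (cs.foldl iterB_step (d, buf, [])).2.2) := by
  intro cs
  induction cs with
  | nil => intro d buf out; simp
  | cons c rest ih =>
    intro d buf out
    have key : ∀ (d' : Int) (b' : List Char) (o : List String),
        rest.foldl iterB_step (d', b', out ++ o) =
          ((rest.foldl iterB_step (d', b', o)).1,
           (rest.foldl iterB_step (d', b', o)).2.1,
           out ++ (rest.foldl iterB_step (d', b', o)).2.2) := by
      intro d' b' o
      rw [ih d' b' (out ++ o), ih d' b' o]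
      simp
    simp only [List.foldl_cons, iterB_step]
    split_ifs
    all_goals first
      | exact ih _ _ _
      | simpa using key _ _ [String.ofList buf]

-- at depth 0, B ignores every character that is not '{'
theorem iterB_skip : ∀ (cs : List Char) (buf : List Char) (out : List String),
    cs.foldl iterB_step (0, buf, out) =
      (cs.dropWhile (· ≠ '{')).foldl iterB_step (0, buf, out) := by
  intro cs
  induction cs with
  | nil => intro buf out; simp
  | cons c rest ih =>
    intro buf out
    by_cases hc : c = '{'
    · subst hc; simp [List.dropWhile_cons]
    · rw [List.dropWhile_cons, if_pos (by simp [hc])]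
      rw [List.foldl_cons]
      have hstep : iterB_step (0, buf, out) c = (0, buf, out) := by
        simp only [iterB_step]
        rw [if_neg hc]
        split_ifs <;> simp_all
      rw [hstep, ih]

-- inside a group: A's inner scan and B's loop do the same thing
theorem iterB_inner : ∀ (cs : List Char) (d : Int) (buf : List Char) (out : List String)
    (s : String) (rest2 : List Char), 1 ≤ d →
    iterA_inner cs d buf = some (s, rest2) →
    cs.foldl iterB_step (d, buf, out) = rest2.foldl iterB_step (0, [], out ++ [s]) := by
  intro cs
  induction cs with
  | nil => intro d buf out s rest2 _ h; simp [iterA_inner] at h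
  | cons c rest ih =>
    intro d buf out s rest2 hd h
    simp only [iterA_inner] at h
    by_cases h1 : c = '{'
    · simp only [if_pos h1] at h
      simp only [List.foldl_cons, iterB_step, if_pos h1]
      rw [if_pos (by omega)]
      exact ih _ _ _ _ _ (by omega) h
    · by_cases h2 : c = '}'
      · simp only [if_neg h1, if_pos h2] at h
        by_cases h3 : d - 1 = 0
        · rw [if_pos h3] at h
          simp only [Option.some.injEq, Prod.mk.injEq] at h
          simp only [List.foldl_cons, iterB_step, if_neg h1, if_pos h2]
          rw [if_neg (by omega), if_pos (by omega), h.1, h.2]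
        · rw [if_neg h3] at h
          simp only [List.foldl_cons, iterB_step, if_neg h1, if_pos h2]
          rw [if_pos (by omega)]
          exact ih _ _ _ _ _ (by omega) h
      · simp only [if_neg h1, if_neg h2] at h
        simp only [List.foldl_cons, iterB_step, if_neg h1, if_neg h2]
        rw [if_pos (by omega)]
        exact ih _ _ _ _ _ hd h

-- if the depth returns to 0, A's inner scan succeeds and leaves a balanced tail
theorem iterA_inner_some : ∀ (cs : List Char) (d : Int) (buf : List Char), 1 ≤ d →
    balD cs d = 0 →
    ∃ s rest2, iterA_inner cs d buf = some (s, rest2) ∧ balD rest2 0 = 0 := by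
  intro cs
  induction cs with
  | nil => intro d buf hd hb; rw [balD_nil] at hb; omega
  | cons c rest ih =>
    intro d buf hd hb
    rw [balD_cons] at hb
    by_cases h1 : c = '{'
    · subst h1
      rw [if_pos rfl] at hb
      obtain ⟨s, r2, he, hb2⟩ := ih (d + 1) (buf ++ ['{']) (by omega) hb
      exact ⟨s, r2, by simp [iterA_inner, he], hb2⟩
    · by_cases h2 : c = '}'
      · subst h2
        rw [if_neg h1, if_pos ⟨rfl, by omega⟩] at hb
        by_cases h3 : d - 1 = 0
        · refine ⟨String.ofList buf, rest, ?_, ?_⟩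
          · simp [iterA_inner, h1, h3]
          · rw [h3] at hb; exact hb
        · obtain ⟨s, r2, he, hb2⟩ := ih (d - 1) (buf ++ ['}']) (by omega) hb
          exact ⟨s, r2, by simp [iterA_inner, h1, h3, he], hb2⟩
      · rw [if_neg h1, if_neg (by simp [h2])] at hb
        obtain ⟨s, r2, he, hb2⟩ := ih d (buf ++ [c]) hd hb
        exact ⟨s, r2, by simp [iterA_inner, h1, h2, he], hb2⟩

-- the balance is unchanged while skipping non-'{' characters at depth 0
theorem balD_dropWhile : ∀ (cs : List Char),
    balD (cs.dropWhile (· ≠ '{')) 0 = balD cs 0 := by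
  intro cs
  induction cs with
  | nil => simp
  | cons c rest ih =>
    by_cases hc : c = '{'
    · subst hc; simp [List.dropWhile_cons]
    · rw [List.dropWhile_cons, if_pos (by simp [hc])]
      rw [balD_cons, if_neg hc, if_neg (by simp [hc])]
      exact ih

-- the first character dropWhile (· ≠ '{') stops at is '{'
theorem dropWhile_head_open : ∀ (cs : List Char) (c : Char) (rest : List Char),
    cs.dropWhile (· ≠ '{') = c :: rest → c = '{' := by
  intro cs
  induction cs with
  | nil => intro c rest h; simp at h
  | cons x xs ih =>
    intro c rest h
    by_cases hx : x = '{'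
    · rw [List.dropWhile_cons, if_neg (by simp [hx])] at h
      rw [← hx]; exact (List.cons.injEq _ _ _ _ ▸ h).1.symm
    · rw [List.dropWhile_cons, if_pos (by simp [hx])] at h
      exact ih _ _ h

theorem main_lemma : ∀ (n : Nat) (cs : List Char), cs.length ≤ n → balD cs 0 = 0 →
    iterA_outer cs = (cs.foldl iterB_step (0, [], [])).2.2 := by
  intro n
  induction n with
  | zero =>
    intro cs hl _
    have : cs = [] := List.eq_nil_of_length_eq_zero (by omega)
    subst this
    simp [iterA_outer]
  | succ n ih =>
    intro cs hl hb
    rw [iterB_skip]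
    rw [iterA_outer.eq_def]
    cases h2 : cs.dropWhile (· ≠ '{') with
    | nil => simp
    | cons c rest =>
      have hc : c = '{' := dropWhile_head_open cs c rest h2
      have hb2 : balD rest 1 = 0 := by
        have hbd := balD_dropWhile cs
        rw [h2, balD_cons, if_pos hc] at hbd
        rw [hb] at hbd
        simpa using hbd
      obtain ⟨s, rest2, he, hb3⟩ := iterA_inner_some rest 1 [] (by omega) hb2
      have hrest : rest.length + 1 ≤ cs.length := by
        have hd := List.length_dropWhile_le (p := (· ≠ '{')) cs
        rw [h2] at hd; simpa using hd
      have hr2 := iterA_inner_length rest 1 [] s rest2 he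
      have hstep : iterB_step (0, [], []) c = (1, [], []) := by
        subst hc
        simp [iterB_step]
      split
      · rename_i habs; cases habs
      · rename_i c' rest' hcons
        injection hcons with hc' hr'
        subst hc'; subst hr'
        split
        · rename_i hnone
          rw [hnone] at he; cases he
        · rename_i s' r2' hsome
          rw [hsome] at he
          simp only [Option.some.injEq, Prod.mk.injEq] at he
          obtain ⟨hs, hr⟩ := he
          subst hs; subst hr
          rw [List.foldl_cons, hstep]
          rw [iterB_inner rest 1 [] [] s' r2' (by omega) hsome]
          rw [iterB_out_append]
          simp only [List.nil_append, List.singleton_append]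
          rw [ih r2' (by omega) hb3]

-- ===== VERDICT (by name: the statement is the Claim_ definition above) =====
theorem iter_array_tables_spec : Claim_equal_iter_array_tables := by
  intro tb _ hpre
  unfold Spec_iter_array_tables iter_array_tables iter_array_tables_alt
  exact main_lemma tb.toList.length tb.toList le_rfl hpre
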